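-- pv_equiv track=rewrite | github.com/Tilo-K/Handmade-Tools | scan.py | gen_addr
-- ===== SOURCE A (Python) =====
-- def gen_addr(addr_list):
--     if len(addr_list) == 0:
--         return addr_list
--     if not '*' in addr_list[0]:
--         return addr_list
--
--     ret_list = []
--     for addr in addr_list:
--         for i in range(1,256):
--             ip = addr.replace('*', str(i), 1)
--             ret_list.append(ip)
--
--     return gen_addr(ret_list)
-- ===== SOURCE B (Python) =====
-- def _expand(addr, depth):
--     if depth == 0:
--         return [addr]
--     out = []
--     for i in range(1, 256):
--         out.extend(_expand(addr.replace('*', str(i), 1), depth - 1))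
--     return out
--
--
-- def gen_addr(addr_list):
--     if not addr_list or '*' not in addr_list[0]:
--         return addr_list
--     k = addr_list[0].count('*')
--     res = []
--     for addr in addr_list:
--         res.extend(_expand(addr, k))
--     return res
-- ===== Notes on version B (the rewrite author's own statement) =====
-- stated objective: alternative
-- what changed: Instead of repeatedly rebuilding the whole list pass by pass until the first element is star-free, B counts the stars in the first element once and expands each address independently by a depth-bounded per-element recursion (depth-first), concatenating the per-address expansions.
import Mathlib
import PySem

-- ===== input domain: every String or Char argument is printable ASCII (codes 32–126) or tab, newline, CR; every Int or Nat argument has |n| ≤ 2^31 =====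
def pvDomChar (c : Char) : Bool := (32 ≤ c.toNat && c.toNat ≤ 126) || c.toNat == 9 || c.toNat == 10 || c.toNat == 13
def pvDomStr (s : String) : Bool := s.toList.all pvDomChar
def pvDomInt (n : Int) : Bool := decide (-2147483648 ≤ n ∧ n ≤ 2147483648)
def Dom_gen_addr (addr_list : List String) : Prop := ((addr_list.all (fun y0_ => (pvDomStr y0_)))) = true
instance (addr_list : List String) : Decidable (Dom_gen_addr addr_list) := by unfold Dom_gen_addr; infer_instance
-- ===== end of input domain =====

-- B replaces A's global fixed-point passes (rebuild the whole list until the first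
-- element is star-free) by counting the first element's stars once and expanding each
-- address independently with a depth-bounded depth-first recursion.

-- ===== PORT A =====
-- models Python's s.replace('*', new, 1) — exact because the old-string is the single char '*'
def replStar : List Char → List Char → List Char
  | [], _ => []
  | c :: rest, new => if c = '*' then new ++ rest else c :: replStar rest new

def strReplStar (s new : String) : String := String.ofList (replStar s.toList new.toList)

-- one replacement by a star-free string removes exactly one star (used by A's measure)
theorem count_replStar (l new : List Char) (hl : '*' ∈ l) (hn : '*' ∉ new) :
    (replStar l new).count '*' = l.count '*' - 1 := by
  induction l with
  | nil => cases hl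
  | cons c rest ih =>
    by_cases hc : c = '*'
    · subst hc
      simp [replStar, List.count_append, List.count_eq_zero_of_not_mem hn]
    · cases hl with
      | head => exact absurd rfl hc
      | tail _ h => simp [replStar, hc, ih h]

-- the ret_list-building pass of A (outer for addr, inner for i, ret_list.append)
def stepA (addr_list : List String) : List String :=
  addr_list.foldl (fun ret addr =>
    (PySem.List.pyRange 1 256 1).foldl (fun ret i =>
      ret ++ [strReplStar addr (PySem.Int.toStr i)]) ret) []

-- termination measure for A: number of '*' in the first element
def headStars : List String → Nat
  | [] => 0
  | a :: _ => a.toList.count '*'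

theorem star_mem_of_isIn (l : List Char) (h : PySem.Chars.isIn ['*'] l = true) : '*' ∈ l := by
  obtain ⟨u, v, huv⟩ := (PySem.Chars.isIn_iff_infix _ _).mp h
  rw [← huv]; simp

theorem stepA_expand (addr_list : List String) :
    stepA addr_list =
      addr_list.flatMap (fun addr =>
        (PySem.List.pyRange 1 256 1).map (fun i => strReplStar addr (PySem.Int.toStr i))) := by
  unfold stepA
  have h : ∀ (acc : List String) (xs : List String),
      xs.foldl (fun ret addr =>
        (PySem.List.pyRange 1 256 1).foldl (fun ret i =>
          ret ++ [strReplStar addr (PySem.Int.toStr i)]) ret) acc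
      = acc ++ xs.flatMap (fun addr =>
          (PySem.List.pyRange 1 256 1).map (fun i => strReplStar addr (PySem.Int.toStr i))) := by
    intro acc xs
    induction xs generalizing acc with
    | nil => simp
    | cons a rest ih =>
      rw [List.foldl_cons, PySem.List.foldl_append_singleton_eq_map, ih, List.flatMap_cons,
        List.append_assoc]
  simpa using h [] addr_list

theorem headStars_stepA (a : String) (rest : List String) (h : '*' ∈ a.toList) :
    headStars (stepA (a :: rest)) < headStars (a :: rest) := by
  rw [stepA_expand]
  have h256 : (1 : Int) < 256 := by norm_num
  rw [List.flatMap_cons, PySem.List.pyRange_one_cons h256, List.map_cons]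
  simp only [List.cons_append, headStars]
  have hone : PySem.Int.toStr (1 : Int) = "1" := by decide
  rw [hone]
  have hn : '*' ∉ ("1" : String).toList := by decide
  have hc := count_replStar a.toList ("1" : String).toList h hn
  have hpos : 0 < a.toList.count '*' := List.count_pos_iff.mpr h
  simp only [strReplStar, String.toList_ofList]
  omega

def gen_addr (addr_list : List String) : List String :=
  if _h0 : addr_list.length = 0 then addr_list
  else if _h1 : ¬ PySem.Str.isIn "*" (PySem.List.pyGetD addr_list 0 "") then addr_list
  else gen_addr (stepA addr_list)
termination_by headStars addr_list
decreasing_by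
  match addr_list, _h0 with
  | a :: rest, _ =>
    apply headStars_stepA
    have h1 := of_not_not _h1
    rw [PySem.List.pyGetD_zero_cons] at h1
    exact star_mem_of_isIn _ (by simpa [PySem.Str.isIn] using h1)

-- ===== PORT B =====
-- _expand(addr, depth): depth-first, structural recursion on the depth
def expandB : Nat → String → List String
  | 0, addr => [addr]
  | d + 1, addr =>
    (PySem.List.pyRange 1 256 1).foldl
      (fun out i => out ++ expandB d (strReplStar addr (PySem.Int.toStr i))) []

-- B: count the stars of the first element once, expand each address to that depth
def gen_addr_alt (addr_list : List String) : List String :=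
  if addr_list = [] ∨ ¬ PySem.Str.isIn "*" (PySem.List.pyGetD addr_list 0 "") then
    addr_list
  else
    let k := PySem.Str.count (PySem.List.pyGetD addr_list 0 "") "*"
    addr_list.foldl (fun res addr => res ++ expandB k addr) []

-- ===== PRECONDITION & SPEC =====
def Spec_gen_addr (addr_list : List String) (out : List String) : Prop := out = gen_addr_alt addr_list
instance (addr_list : List String) (out : List String) : Decidable (Spec_gen_addr addr_list out) := by unfold Spec_gen_addr; infer_instance

-- ===== CLAIM =====
def Claim_equal_gen_addr : Prop := ∀ (addr_list : List String), Dom_gen_addr addr_list → Spec_gen_addr addr_list (gen_addr addr_list)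

-- ===== LEMMAS AND PROOFS =====
theorem count_go_singleton (c : Char) (l : List Char) :
    ∀ (fuel acc : Nat), l.length ≤ fuel →
      PySem.Chars.count.go [c] fuel l acc = acc + l.count c := by
  induction l with
  | nil =>
    intro fuel acc _
    cases fuel <;> simp [PySem.Chars.count.go]
  | cons a t ih =>
    intro fuel acc hf
    cases fuel with
    | zero => simp at hf
    | succ f =>
      by_cases hac : a = c
      · subst hac
        have : [a].isPrefixOf (a :: t) = true := by simp [List.isPrefixOf]
        simp only [PySem.Chars.count.go, this, if_pos]
        rw [List.length_singleton, List.drop_one, List.tail_cons,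
          ih f (acc + 1) (by simpa using Nat.lt_succ_iff.mp (Nat.lt_of_lt_of_le (by simp) hf))]
        simp
        omega
      · have hp : [c].isPrefixOf (a :: t) = false := by
          simp [List.isPrefixOf]
          exact fun h => absurd h.symm hac
        simp only [PySem.Chars.count.go, hp]
        rw [ih f acc (by simpa using Nat.lt_succ_iff.mp (Nat.lt_of_lt_of_le (by simp) hf))]
        simp [hac]

theorem chars_count_singleton (c : Char) (l : List Char) :
    PySem.Chars.count l [c] = l.count c := by
  simp [PySem.Chars.count]
  simpa using count_go_singleton c l l.length 0 le_rfl

theorem expandB_succ (d : Nat) (addr : String) :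
    expandB (d + 1) addr =
      ((PySem.List.pyRange 1 256 1).map
        (fun i => strReplStar addr (PySem.Int.toStr i))).flatMap (expandB d) := by
  rw [List.flatMap_map,
    show expandB (d + 1) addr = (PySem.List.pyRange 1 256 1).foldl
      (fun out i => out ++ expandB d (strReplStar addr (PySem.Int.toStr i))) [] from rfl,
    PySem.List.foldl_append_eq_flatMap, List.nil_append]

-- pushing one A-pass through the flatMap of depth-d expansions
theorem stepA_flatMap (d : Nat) (L : List String) :
    (stepA L).flatMap (expandB d) = L.flatMap (expandB (d + 1)) := by
  rw [stepA_expand, List.flatMap_assoc]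
  exact congrArg (fun g => List.flatMap g L) (funext fun a => (expandB_succ d a).symm)

theorem alt_flatMap (L : List String) (k : Nat) :
    L.foldl (fun res addr => res ++ expandB k addr) [] = L.flatMap (expandB k) := by
  rw [PySem.List.foldl_append_eq_flatMap]
  simp

theorem headStars_eq_count (a : String) (rest : List String) :
    PySem.Str.count (PySem.List.pyGetD (a :: rest) 0 "") "*" = headStars (a :: rest) := by
  rw [PySem.List.pyGetD_zero_cons]
  show PySem.Str.count a "*" = a.toList.count '*'
  rw [PySem.Str.count_eq]
  exact chars_count_singleton '*' a.toList

theorem not_star_of_count_zero (a : String) (h : a.toList.count '*' = 0) :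
    ¬ PySem.Str.isIn "*" a = true := by
  intro hin
  have hmem := star_mem_of_isIn a.toList (by simpa [PySem.Str.isIn] using hin)
  have := List.count_pos_iff.mpr hmem
  omega

-- A keeps consuming passes until the head is star-free:
-- gen_addr L = L.flatMap (expandB (headStars L)) whenever the loop runs at least once.
theorem gen_eq_flatMap : ∀ (L : List String), L ≠ [] →
    PySem.Str.isIn "*" (PySem.List.pyGetD L 0 "") = true →
    gen_addr L = L.flatMap (expandB (headStars L)) := by
  intro L
  induction L using gen_addr.induct with
  | case1 xs h0 =>
    intro hne _
    exact absurd (List.length_eq_zero_iff.mp h0) hne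
  | case2 xs h0 h1 =>
    intro _ hstar
    exact absurd hstar h1
  | case3 xs h0 h1 ih =>
    intro hne hstar
    obtain ⟨a, rest, rfl⟩ := List.exists_cons_of_ne_nil hne
    have hmem : '*' ∈ a.toList := by
      have h1' := of_not_not h1
      rw [PySem.List.pyGetD_zero_cons] at h1'
      exact star_mem_of_isIn _ (by simpa [PySem.Str.isIn] using h1')
    have hk : 0 < headStars (a :: rest) := List.count_pos_iff.mpr hmem
    rw [gen_addr, dif_neg h0, dif_neg h1]
    have hstep : stepA (a :: rest) ≠ [] := by
      rw [stepA_expand]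
      have h256 : (1 : Int) < 256 := by norm_num
      rw [List.flatMap_cons, PySem.List.pyRange_one_cons h256]
      simp
    obtain ⟨b, rest', hb⟩ := List.exists_cons_of_ne_nil hstep
    have hdec : headStars (stepA (a :: rest)) = headStars (a :: rest) - 1 := by
      rw [stepA_expand]
      have h256 : (1 : Int) < 256 := by norm_num
      rw [List.flatMap_cons, PySem.List.pyRange_one_cons h256, List.map_cons]
      simp only [List.cons_append, headStars]
      have hone : PySem.Int.toStr (1 : Int) = "1" := by decide
      rw [hone]
      have hn : '*' ∉ ("1" : String).toList := by decide
      have hc := count_replStar a.toList ("1" : String).toList hmem hn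
      simp only [strReplStar, String.toList_ofList]
      exact hc
    by_cases hz : headStars (stepA (a :: rest)) = 0
    · -- after this pass the head is star-free: the next call returns its input; depth was 1
      have hk1 : headStars (a :: rest) = 1 := by omega
      have hnostar : ¬ PySem.Str.isIn "*" (PySem.List.pyGetD (stepA (a :: rest)) 0 "") = true := by
        rw [hb, PySem.List.pyGetD_zero_cons]
        apply not_star_of_count_zero
        have : headStars (b :: rest') = 0 := hb ▸ hz
        simpa [headStars] using this
      rw [gen_addr, dif_neg (by rw [hb]; simp), dif_pos hnostar, hk1]
      have hid : stepA (a :: rest) = (stepA (a :: rest)).flatMap (expandB 0) := by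
        simp [expandB]
      rw [hid, stepA_flatMap]
    · -- the head still has a star: apply the induction hypothesis one pass down
      have hstar' : PySem.Str.isIn "*" (PySem.List.pyGetD (stepA (a :: rest)) 0 "") = true := by
        rw [hb, PySem.List.pyGetD_zero_cons]
        have hmemb : '*' ∈ b.toList := by
          have hzz : headStars (b :: rest') ≠ 0 := hb ▸ hz
          simp only [headStars] at hzz
          exact List.count_pos_iff.mp (Nat.pos_of_ne_zero hzz)
        have hinf : ['*'] <:+: b.toList := by
          obtain ⟨u, v, huv⟩ := List.append_of_mem hmemb
          exact ⟨u, v, by rw [huv]; simp⟩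
        simp only [PySem.Str.isIn]
        exact (PySem.Chars.isIn_iff_infix _ _).mpr (by simpa using hinf)
      have hsum : headStars (a :: rest) - 1 + 1 = headStars (a :: rest) := by omega
      rw [ih hstep hstar', hdec, stepA_flatMap, hsum]

theorem alt_eq_flatMap (L : List String) (hne : L ≠ [])
    (hstar : PySem.Str.isIn "*" (PySem.List.pyGetD L 0 "") = true) :
    gen_addr_alt L = L.flatMap (expandB (headStars L)) := by
  obtain ⟨a, rest, rfl⟩ := List.exists_cons_of_ne_nil hne
  rw [gen_addr_alt, if_neg (by simp only [not_or, not_not]; exact ⟨by simp, hstar⟩)]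
  show (a :: rest).foldl
      (fun res addr => res ++ expandB (PySem.Str.count (PySem.List.pyGetD (a :: rest) 0 "") "*") addr) []
    = (a :: rest).flatMap (expandB (headStars (a :: rest)))
  rw [alt_flatMap, headStars_eq_count]

theorem gen_eq (addr_list : List String) : gen_addr addr_list = gen_addr_alt addr_list := by
  by_cases hne : addr_list = []
  · subst hne
    rw [gen_addr, gen_addr_alt]
    simp
  · by_cases hstar : PySem.Str.isIn "*" (PySem.List.pyGetD addr_list 0 "") = true
    · rw [gen_eq_flatMap addr_list hne hstar, alt_eq_flatMap addr_list hne hstar]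
    · rw [gen_addr, dif_neg (by simpa using hne), dif_pos hstar, gen_addr_alt,
        if_pos (Or.inr hstar)]

-- ===== VERDICT =====
theorem gen_addr_spec : Claim_equal_gen_addr := by
  intro addr_list _
  unfold Spec_gen_addr
  exact gen_eq addr_list
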